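-- pv_equiv track=rewrite | github.com/mearafGitHub/Algorithims | kth_task.py | kth_smallest_task
-- ===== SOURCE A (Python) =====
-- import heapq
--
-- def kth_smallest_task(task):
--     result =[]
--     heapq.heapify(task)
--     kth = []
--     for _ in range(len(task)):
--         pass
--     for t in range(3):
--         result.append(heapq.heappop(task))
--     return result
-- ===== SOURCE B (Python) =====
-- def kth_smallest_task(task):
--     # Return-value equivalence only: A leaves `task` a popped heap, B leaves it fully sorted.
--     task.sort()
--     return task[:3]
-- ===== Notes on version B (the rewrite author's own statement) =====
-- stated objective: simpler
-- what changed: Replaced heapify plus three selective heappops (and a dead empty loop) with one in-place full sort followed by a 3-prefix slice; return value only, the observable mutation of `task` differs (heap vs sorted).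
import Mathlib
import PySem

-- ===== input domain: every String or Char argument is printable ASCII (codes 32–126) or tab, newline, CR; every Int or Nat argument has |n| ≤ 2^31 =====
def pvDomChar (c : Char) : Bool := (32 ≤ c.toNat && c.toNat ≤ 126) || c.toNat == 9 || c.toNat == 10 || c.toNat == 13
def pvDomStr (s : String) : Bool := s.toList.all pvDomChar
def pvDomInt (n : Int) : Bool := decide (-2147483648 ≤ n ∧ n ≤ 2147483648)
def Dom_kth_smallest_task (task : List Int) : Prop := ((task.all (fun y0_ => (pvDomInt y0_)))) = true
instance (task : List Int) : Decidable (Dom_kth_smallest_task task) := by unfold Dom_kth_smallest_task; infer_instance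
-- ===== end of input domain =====

-- B replaces A's heapify + three heappops (and a dead empty loop) by one full sort and a
-- 3-prefix slice (simpler); return value only: A leaves `task` a popped heap, B a sorted list.


-- ===== PORT A =====
-- CPython heapq._siftdown(heap, startpos, pos): bubble newitem up toward startpos.
def pvSiftdownAux (heap : List Int) (startpos pos : Nat) (newitem : Int) : List Int :=
  if _h : startpos < pos then
    let parentpos := (pos - 1) / 2
    let parent := heap.getD parentpos 0
    if newitem < parent then pvSiftdownAux (heap.set pos parent) startpos parentpos newitem
    else heap.set pos newitem
  else heap.set pos newitem
termination_by pos
decreasing_by omega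

-- the while-loop of CPython heapq._siftup: move the smaller child up until a leaf is reached
def pvSiftupAux (heap : List Int) (endpos startpos pos childpos : Nat) : List Int × Nat :=
  if _h : childpos < endpos then
    let childpos' := if childpos + 1 < endpos ∧ ¬ (heap.getD childpos 0 < heap.getD (childpos + 1) 0)
                     then childpos + 1 else childpos
    pvSiftupAux (heap.set pos (heap.getD childpos' 0)) endpos startpos childpos' (2 * childpos' + 1)
  else (heap, pos)
termination_by endpos - childpos
decreasing_by
  split <;> omega

def pvSiftdown (heap : List Int) (startpos pos : Nat) : List Int :=
  pvSiftdownAux heap startpos pos (heap.getD pos 0)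

-- CPython heapq._siftup(heap, pos)
def pvSiftup (heap : List Int) (pos : Nat) : List Int :=
  let endpos := heap.length
  let startpos := pos
  let newitem := heap.getD pos 0
  let r := pvSiftupAux heap endpos startpos pos (2 * pos + 1)
  pvSiftdown (r.1.set r.2 newitem) startpos r.2

-- heapq.heapify: for i in reversed(range(n//2)): _siftup(x, i)
def pvHeapify (x : List Int) : List Int :=
  ((List.range (x.length / 2)).reverse).foldl (fun h i => pvSiftup h i) x

-- heapq.heappop (on a nonempty heap; the pop from an empty list is excluded by Pre_)
def pvHeappop (heap : List Int) : Int × List Int :=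
  let lastelt := heap.getD (heap.length - 1) 0
  let heap' := heap.dropLast
  if heap' ≠ [] then
    (heap'.getD 0 0, pvSiftup (heap'.set 0 lastelt) 0)
  else (lastelt, heap')

def kth_smallest_task (task : List Int) : List Int :=
  -- result = []; heapq.heapify(task); the 'for _ in range(len(task)): pass' loop is a no-op;
  -- for t in range(3): result.append(heapq.heappop(task))
  let task1 := pvHeapify task
  ((List.range 3).foldl (fun (st : List Int × List Int) _ =>
      let r := pvHeappop st.2
      (st.1 ++ [r.1], r.2)) ([], task1)).1

-- ===== PORT B =====
def kth_smallest_task_alt (task : List Int) : List Int :=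
  -- task.sort(); return task[:3]
  PySem.List.slice (PySem.List.sorted task (fun x => x) false) none (some 3)

-- ===== PRECONDITION & SPEC =====
-- A pops the heap three times, so it raises IndexError on lists with fewer than 3 elements.
def Pre_kth_smallest_task (task : List Int) : Prop := 3 ≤ task.length
instance (task : List Int) : Decidable (Pre_kth_smallest_task task) := by
  unfold Pre_kth_smallest_task; infer_instance
def pvWitness_kth_smallest_task : List Int := [3, 1, 2]

def Spec_kth_smallest_task (task : List Int) (out : List Int) : Prop := out = kth_smallest_task_alt task
instance (task : List Int) (out : List Int) : Decidable (Spec_kth_smallest_task task out) := by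
  unfold Spec_kth_smallest_task; infer_instance

-- ===== CLAIM (what is proved, stated in full; the proofs are below) =====
def Claim_equal_kth_smallest_task : Prop := ∀ (task : List Int), Dom_kth_smallest_task task → Pre_kth_smallest_task task → Spec_kth_smallest_task task (kth_smallest_task task)

-- ===== LEMMAS AND PROOFS =====
-- ancestor-in-the-implicit-binary-heap relation on array indices
def pvGet (l : List Int) (i : Nat) : Int := l.getD i 0

def pvAnc (s j : Nat) : Prop := ∃ k, (fun m => (m - 1) / 2)^[k] j = s

-- heap order on the subtree of s, except at edges whose PARENT is `hole` (descent invariant)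
def pvHoleHeap (l : List Int) (s hole : Nat) : Prop :=
  ∀ j, 1 ≤ j → j < l.length → pvAnc s j → j ≠ s → (j - 1) / 2 ≠ hole →
    pvGet l ((j - 1) / 2) ≤ pvGet l j

-- heap order on the subtree of s, except at the edge whose CHILD is `hole` (ascent invariant)
def pvHeapExceptAt (l : List Int) (s hole : Nat) : Prop :=
  ∀ j, 1 ≤ j → j < l.length → pvAnc s j → j ≠ s → j ≠ hole →
    pvGet l ((j - 1) / 2) ≤ pvGet l j

-- the hole's original value (now sitting at its parent) is below the hole's children
def pvHoleChildren (l : List Int) (s pos : Nat) : Prop :=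
  pos ≠ s → ∀ j, 1 ≤ j → j < l.length → (j - 1) / 2 = pos →
    pvGet l ((pos - 1) / 2) ≤ pvGet l j

-- heap order at every edge whose parent index is ≥ i
def pvBelow (l : List Int) (i : Nat) : Prop :=
  ∀ j, 1 ≤ j → j < l.length → i ≤ (j - 1) / 2 → pvGet l ((j - 1) / 2) ≤ pvGet l j

lemma pvAnc_refl (s : Nat) : pvAnc s s := ⟨0, rfl⟩

lemma pv_iterate_le (k : Nat) : ∀ j : Nat, (fun m => (m - 1) / 2)^[k] j ≤ j := by
  induction k with
  | zero => intro j; simp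
  | succ k ih =>
    intro j
    rw [Function.iterate_succ_apply]
    exact le_trans (ih ((j - 1) / 2)) (by omega)

lemma pvAnc_le {s j : Nat} (h : pvAnc s j) : s ≤ j := by
  obtain ⟨k, hk⟩ := h
  subst hk
  exact pv_iterate_le k j

lemma pvAnc_child {s j : Nat} (h : pvAnc s ((j - 1) / 2)) : pvAnc s j := by
  obtain ⟨k, hk⟩ := h
  exact ⟨k + 1, by rw [Function.iterate_succ_apply]; exact hk⟩

lemma pvAnc_par {s j : Nat} (h : pvAnc s j) (hne : j ≠ s) : pvAnc s ((j - 1) / 2) := by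
  obtain ⟨k, hk⟩ := h
  cases k with
  | zero => exact absurd hk hne
  | succ k => exact ⟨k, by rw [Function.iterate_succ_apply] at hk; exact hk⟩

lemma pvGet_set_self (l : List Int) (i : Nat) (v : Int) (h : i < l.length) :
    pvGet (l.set i v) i = v := by
  simp [pvGet, List.getD_eq_getElem?_getD, List.getElem?_set_self h]

lemma pvGet_set_ne (l : List Int) (i j : Nat) (v : Int) (h : i ≠ j) :
    pvGet (l.set i v) j = pvGet l j := by
  simp [pvGet, List.getD_eq_getElem?_getD, List.getElem?_set_ne h]

lemma pv_set_get_self (l : List Int) (i : Nat) (h : i < l.length) : l.set i (pvGet l i) = l := by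
  simp [pvGet, List.getD_eq_getElem?_getD, List.getElem?_eq_getElem h]

lemma pv_cons_set_comm : ∀ (t : List Int) (k : Nat) (a b : Int), k < t.length →
    (a :: t.set k b).Perm (b :: t.set k a) := by
  intro t
  induction t with
  | nil => intro k a b h; simp at h
  | cons x t ih =>
    intro k a b h
    cases k with
    | zero => simpa using List.Perm.swap b a t
    | succ k =>
      have h' : k < t.length := by simpa using h
      exact (List.Perm.swap x a (t.set k b)).trans
        ((List.Perm.cons x (ih k a b h')).trans (List.Perm.swap b x (t.set k a)))

lemma pv_set_set_perm : ∀ (l : List Int) (i j : Nat) (v : Int), i < l.length → j < l.length →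
    i ≠ j → ((l.set i (pvGet l j)).set j v).Perm (l.set i v) := by
  intro l
  induction l with
  | nil => intro i j v h; simp at h
  | cons x t ih =>
    intro i j v hi hj hij
    cases i with
    | zero =>
      cases j with
      | zero => exact absurd rfl hij
      | succ j =>
        have hj' : j < t.length := by simpa using hj
        have : pvGet (x :: t) (j + 1) = pvGet t j := by simp [pvGet]
        rw [this]
        show (pvGet t j :: t.set j v).Perm (v :: t)
        have := pv_cons_set_comm t j (pvGet t j) v hj'
        rwa [pv_set_get_self t j hj'] at this
    | succ i =>
      cases j with
      | zero =>
        have hi' : i < t.length := by simpa using hi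
        show (v :: t.set i x).Perm (x :: t.set i v)
        exact pv_cons_set_comm t i v x hi'
      | succ j =>
        have : pvGet (x :: t) (j + 1) = pvGet t j := by simp [pvGet]
        rw [this]
        exact List.Perm.cons x (ih i j v (by simpa using hi) (by simpa using hj) (by omega))

lemma pvSiftdownAux_eq (heap : List Int) (s pos : Nat) (newitem : Int) :
    pvSiftdownAux heap s pos newitem =
      if s < pos then
        (if newitem < pvGet heap ((pos - 1) / 2) then
          pvSiftdownAux (heap.set pos (pvGet heap ((pos - 1) / 2))) s ((pos - 1) / 2) newitem
        else heap.set pos newitem)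
      else heap.set pos newitem := by
  rw [pvSiftdownAux]
  by_cases h : s < pos <;> simp [h, pvGet]

-- conclusions of the ascent at its two exit points
lemma pvSiftdown_exit (l : List Int) (s pos : Nat) (newitem : Int)
    (hpos : pos < l.length) (hanc : pvAnc s pos)
    (hJ2 : pvHeapExceptAt l s pos)
    (hJ3 : ∀ j, 1 ≤ j → j < l.length → (j - 1) / 2 = pos → newitem ≤ pvGet l j)
    (hstop : pos ≠ s → pvGet l ((pos - 1) / 2) ≤ newitem) :
    (l.set pos newitem).length = l.length ∧
    (l.set pos newitem).Perm (l.set pos newitem) ∧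
    (∀ j, 1 ≤ j → j < l.length → pvAnc s j → j ≠ s →
        pvGet (l.set pos newitem) ((j - 1) / 2) ≤ pvGet (l.set pos newitem) j) ∧
    (∀ j, j < l.length → ¬ pvAnc s j → pvGet (l.set pos newitem) j = pvGet l j) := by
  refine ⟨List.length_set .., List.Perm.refl _, ?_, ?_⟩
  · intro j h1 hj hancj hjs
    by_cases hjpos : j = pos
    · subst hjpos
      have hps : j ≠ s := hjs
      have hppj : (j - 1) / 2 ≠ j := by omega
      rw [pvGet_set_self l j newitem hj, pvGet_set_ne l j ((j - 1) / 2) newitem (fun h => hppj h.symm)]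
      exact hstop hps
    · by_cases hpj : (j - 1) / 2 = pos
      · rw [hpj, pvGet_set_self l pos newitem hpos,
            pvGet_set_ne l pos j newitem (fun h => hjpos h.symm)]
        exact hJ3 j h1 hj hpj
      · rw [pvGet_set_ne l pos j newitem (fun h => hjpos h.symm),
            pvGet_set_ne l pos ((j - 1) / 2) newitem (fun h => hpj h.symm)]
        exact hJ2 j h1 hj hancj hjs hjpos
  · intro j hj hn
    have : j ≠ pos := fun h => hn (h ▸ hanc)
    exact pvGet_set_ne l pos j newitem (fun h => this h.symm)

-- ===== the ascent loop (CPython _siftdown) =====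
lemma pvSiftdownAux_spec : ∀ (pos : Nat) (l : List Int) (s : Nat) (newitem : Int),
    pos < l.length → pvAnc s pos →
    pvHeapExceptAt l s pos →
    (∀ j, 1 ≤ j → j < l.length → (j - 1) / 2 = pos → newitem ≤ pvGet l j) →
    pvHoleChildren l s pos →
    (pvSiftdownAux l s pos newitem).length = l.length ∧
    (pvSiftdownAux l s pos newitem).Perm (l.set pos newitem) ∧
    (∀ j, 1 ≤ j → j < l.length → pvAnc s j → j ≠ s →
        pvGet (pvSiftdownAux l s pos newitem) ((j - 1) / 2) ≤ pvGet (pvSiftdownAux l s pos newitem) j) ∧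
    (∀ j, j < l.length → ¬ pvAnc s j → pvGet (pvSiftdownAux l s pos newitem) j = pvGet l j) := by
  intro pos
  induction pos using Nat.strong_induction_on with
  | _ pos ih =>
    intro l s newitem hpos hanc hJ2 hJ3 hJ4
    rw [pvSiftdownAux_eq]
    by_cases hsp : s < pos
    · rw [if_pos hsp]
      by_cases hlt : newitem < pvGet l ((pos - 1) / 2)
      · rw [if_pos hlt]
        -- recursive case: shift the parent down, move the hole up
        have hpos1 : 1 ≤ pos := by have := pvAnc_le hanc; omega
        have hpplt : (pos - 1) / 2 < pos := by omega
        have hpps : pos ≠ s := by omega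
        have hppl : (pos - 1) / 2 < l.length := by omega
        have hancp : pvAnc s ((pos - 1) / 2) := pvAnc_par hanc hpps
        have hspp : s ≤ (pos - 1) / 2 := pvAnc_le hancp
        have hJ2' : pvHeapExceptAt (l.set pos (pvGet l ((pos - 1) / 2))) s ((pos - 1) / 2) := by
          -- the hole moved up to (pos-1)/2
          intro j h1 hj hancj hjs hjpp
          rw [List.length_set] at hj
          by_cases hjpos : j = pos
          · subst hjpos
            rw [pvGet_set_self l j _ hpos,
                pvGet_set_ne l j ((j - 1) / 2) _ (by omega)]
          · by_cases hpj : (j - 1) / 2 = pos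
            · rw [hpj, pvGet_set_self l pos _ hpos,
                  pvGet_set_ne l pos j _ (fun h => hjpos h.symm)]
              exact hJ4 hpps j h1 hj hpj
            · rw [pvGet_set_ne l pos j _ (fun h => hjpos h.symm),
                  pvGet_set_ne l pos ((j - 1) / 2) _ (fun h => hpj h.symm)]
              exact hJ2 j h1 hj hancj hjs hjpos
        have hJ3' : ∀ j, 1 ≤ j → j < (l.set pos (pvGet l ((pos - 1) / 2))).length →
            (j - 1) / 2 = (pos - 1) / 2 → newitem ≤ pvGet (l.set pos (pvGet l ((pos - 1) / 2))) j := by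
          intro j h1 hj hpj
          rw [List.length_set] at hj
          by_cases hjpos : j = pos
          · subst hjpos
            rw [pvGet_set_self l j _ hpos]
            exact le_of_lt hlt
          · rw [pvGet_set_ne l pos j _ (fun h => hjpos h.symm)]
            have hancj : pvAnc s j := pvAnc_child (hpj ▸ hancp)
            have hjs : j ≠ s := by omega
            have := hJ2 j h1 hj hancj hjs hjpos
            rw [hpj] at this
            exact le_of_lt (lt_of_lt_of_le hlt this)
        have hJ4' : pvHoleChildren (l.set pos (pvGet l ((pos - 1) / 2))) s ((pos - 1) / 2) := by
          intro hpps' j h1 hj hpj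
          rw [List.length_set] at hj
          have hpp1 : 1 ≤ (pos - 1) / 2 := by omega
          have hedge : pvGet l (((pos - 1) / 2 - 1) / 2) ≤ pvGet l ((pos - 1) / 2) :=
            hJ2 ((pos - 1) / 2) hpp1 hppl hancp hpps' (by omega)
          rw [pvGet_set_ne l pos (((pos - 1) / 2 - 1) / 2) _ (by omega)]
          by_cases hjpos : j = pos
          · subst hjpos
            rw [pvGet_set_self l j _ hpos]
            exact hedge
          · rw [pvGet_set_ne l pos j _ (fun h => hjpos h.symm)]
            have hancj : pvAnc s j := pvAnc_child (hpj ▸ hancp)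
            have hjgt : (pos - 1) / 2 < j := by omega
            have := hJ2 j h1 hj hancj (by omega) hjpos
            rw [hpj] at this
            exact le_trans hedge this
        obtain ⟨hL, hP, hH, hF⟩ := ih ((pos - 1) / 2) hpplt (l.set pos (pvGet l ((pos - 1) / 2)))
          s newitem (by simpa using hppl) hancp hJ2' hJ3' hJ4'
        refine ⟨by simpa using hL, ?_, by simpa using hH, ?_⟩
        · exact hP.trans (pv_set_set_perm l pos ((pos - 1) / 2) newitem hpos hppl (by omega))
        · intro j hj hn
          have hjp : j ≠ pos := fun h => hn (h ▸ hanc)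
          exact (hF j (by simpa using hj) hn).trans
            (pvGet_set_ne l pos j _ (fun h => hjp h.symm))
      · rw [if_neg hlt]
        exact pvSiftdown_exit l s pos newitem hpos hanc hJ2 hJ3 (fun _ => by omega)
    · rw [if_neg hsp]
      have : pos = s := by have := pvAnc_le hanc; omega
      exact pvSiftdown_exit l s pos newitem hpos hanc hJ2 hJ3 (fun h => absurd this h)

lemma pvSiftupAux_eq (heap : List Int) (endpos startpos pos childpos : Nat) :
    pvSiftupAux heap endpos startpos pos childpos =
      if childpos < endpos then
        (let c := if childpos + 1 < endpos ∧ ¬ (pvGet heap childpos < pvGet heap (childpos + 1))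
                  then childpos + 1 else childpos
         pvSiftupAux (heap.set pos (pvGet heap c)) endpos startpos c (2 * c + 1))
      else (heap, pos) := by
  rw [pvSiftupAux]
  by_cases h : childpos < endpos <;> simp [h, pvGet]

-- ===== the descent loop (the while-loop of CPython _siftup) =====
lemma pvSiftupAux_spec : ∀ (k : Nat) (l : List Int) (s pos : Nat),
    l.length ≤ pos + k →
    pos < l.length → pvAnc s pos →
    pvHoleHeap l s pos →
    pvHoleChildren l s pos →
    (pvSiftupAux l l.length s pos (2 * pos + 1)).1.length = l.length ∧
    pvAnc s (pvSiftupAux l l.length s pos (2 * pos + 1)).2 ∧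
    (pvSiftupAux l l.length s pos (2 * pos + 1)).2 < l.length ∧
    l.length ≤ 2 * (pvSiftupAux l l.length s pos (2 * pos + 1)).2 + 1 ∧
    pvHoleHeap (pvSiftupAux l l.length s pos (2 * pos + 1)).1 s (pvSiftupAux l l.length s pos (2 * pos + 1)).2 ∧
    (∀ v : Int, ((pvSiftupAux l l.length s pos (2 * pos + 1)).1.set (pvSiftupAux l l.length s pos (2 * pos + 1)).2 v).Perm (l.set pos v)) ∧
    (∀ j, j < l.length → ¬ pvAnc s j → pvGet (pvSiftupAux l l.length s pos (2 * pos + 1)).1 j = pvGet l j) := by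
  intro k
  induction k with
  | zero => intro l s pos hk hpos; exact absurd hk (by omega)
  | succ k ih =>
    intro l s pos hk hpos hanc hK2 hK4
    rw [pvSiftupAux_eq]
    by_cases hc : 2 * pos + 1 < l.length
    · rw [if_pos hc]
      show (pvSiftupAux (l.set pos (pvGet l _)) l.length s _ _).1.length = l.length ∧ _
      set c := if 2 * pos + 1 + 1 < l.length ∧ ¬ (pvGet l (2 * pos + 1) < pvGet l (2 * pos + 1 + 1))
               then 2 * pos + 1 + 1 else 2 * pos + 1 with hcdef
      have hcrange : c = 2 * pos + 1 ∨ c = 2 * pos + 2 := by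
        rw [hcdef]; split <;> omega
      have hclen : c < l.length := by
        rw [hcdef]; split <;> omega
      have hparc : (c - 1) / 2 = pos := by omega
      have hposc : pos < c := by omega
      have hancc : pvAnc s c := pvAnc_child (by rw [hparc]; exact hanc)
      have hsmall : ∀ w, 1 ≤ w → w < l.length → (w - 1) / 2 = pos → pvGet l c ≤ pvGet l w := by
        intro w h1 hw hpw
        have hw2 : w = 2 * pos + 1 ∨ w = 2 * pos + 2 := by omega
        rw [hcdef]
        by_cases hcond : 2 * pos + 1 + 1 < l.length ∧
            ¬ (pvGet l (2 * pos + 1) < pvGet l (2 * pos + 1 + 1))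
        · rw [if_pos hcond]
          rcases hw2 with h | h <;> subst h
          · omega
          · exact le_refl _
        · rw [if_neg hcond]
          rcases hw2 with h | h <;> subst h
          · exact le_refl _
          · rcases not_and_or.mp hcond with h' | h'
            · omega
            · rw [not_not] at h'; exact le_of_lt h'
      have hK2' : pvHoleHeap (l.set pos (pvGet l c)) s c := by
        intro j h1 hj hancj hjs hjc
        rw [List.length_set] at hj
        by_cases hjpos : j = pos
        · subst hjpos
          rw [pvGet_set_ne l j ((j - 1) / 2) _ (by omega), pvGet_set_self l j _ hpos]
          exact hK4 hjs c (by omega) hclen hparc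
        · by_cases hpj : (j - 1) / 2 = pos
          · by_cases hjc2 : j = c
            · subst hjc2
              rw [hpj, pvGet_set_self l pos _ hpos,
                  pvGet_set_ne l pos c _ (by omega)]
            · rw [hpj, pvGet_set_self l pos _ hpos,
                  pvGet_set_ne l pos j _ (fun h => hjpos h.symm)]
              exact hsmall j h1 hj hpj
          · rw [pvGet_set_ne l pos j _ (fun h => hjpos h.symm),
                pvGet_set_ne l pos ((j - 1) / 2) _ (fun h => hpj h.symm)]
            exact hK2 j h1 hj hancj hjs hpj
      have hK4' : pvHoleChildren (l.set pos (pvGet l c)) s c := by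
        intro hcs j h1 hj hpjc
        rw [List.length_set] at hj
        have hjgt : c < j := by omega
        rw [hparc, pvGet_set_self l pos _ hpos,
            pvGet_set_ne l pos j _ (by omega)]
        have hancj : pvAnc s j := pvAnc_child (by rw [hpjc]; exact hancc)
        have hsc : s ≤ c := pvAnc_le hancc
        have := hK2 j h1 hj hancj (by omega) (by omega)
        rw [hpjc] at this
        exact this
      obtain ⟨hL, hA, hltq, hleaf, hHH, hPerm, hF⟩ :=
        ih (l.set pos (pvGet l c)) s c (by simp; omega) (by simp [hclen]) hancc hK2' hK4'
      simp only [List.length_set] at hL hA hltq hleaf hHH hPerm hF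
      refine ⟨hL, hA, hltq, hleaf, hHH, ?_, ?_⟩
      · intro v
        exact (hPerm v).trans (pv_set_set_perm l pos c v hpos hclen (by omega))
      · intro j hj hn
        have hjp : j ≠ pos := fun h => hn (h ▸ hanc)
        exact (hF j hj hn).trans (pvGet_set_ne l pos j _ (fun h => hjp h.symm))
    · rw [if_neg hc]
      exact ⟨rfl, hanc, hpos, by omega, hK2, fun v => List.Perm.refl _, fun j _ _ => rfl⟩

-- ===== CPython _siftup(heap, pos): full spec =====
lemma pvSiftup_spec (l : List Int) (s : Nat) (hs : s < l.length) (H : pvBelow l (s + 1)) :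
    (pvSiftup l s).length = l.length ∧ (pvSiftup l s).Perm l ∧ pvBelow (pvSiftup l s) s := by
  have hK2 : pvHoleHeap l s s := by
    intro j h1 hj hancj hjs _
    have hancp : pvAnc s ((j - 1) / 2) := pvAnc_par hancj hjs
    have hsp : s ≤ (j - 1) / 2 := pvAnc_le hancp
    have hps : (j - 1) / 2 ≠ s := by
      intro h
      exact hjs (le_antisymm (by omega) (pvAnc_le hancj))
    exact H j h1 hj (by omega)
  have hK4 : pvHoleChildren l s s := fun h => absurd rfl h
  obtain ⟨hL, hA, hq, hleaf, hHH, hPerm, hF⟩ :=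
    pvSiftupAux_spec l.length l s s (by omega) hs (pvAnc_refl s) hK2 hK4
  set r := pvSiftupAux l l.length s s (2 * s + 1) with hr
  set newitem := l.getD s 0 with hni
  have hq2 : r.2 < r.1.length := by omega
  set l₂ := r.1.set r.2 newitem with hl2
  have hL2 : l₂.length = l.length := by rw [hl2, List.length_set, hL]
  have hgetq : l₂.getD r.2 0 = newitem := pvGet_set_self r.1 r.2 newitem hq2
  have hunf : pvSiftup l s = pvSiftdownAux l₂ s r.2 (l₂.getD r.2 0) := rfl
  have hnochild : ∀ j : Nat, 1 ≤ j → j < l₂.length → (j - 1) / 2 ≠ r.2 := by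
    intro j h1 hj heq
    rw [hL2] at hj
    omega
  have hJ2d : pvHeapExceptAt l₂ s r.2 := by
    -- heap except at the landing hole r.2 (a leaf, so it has no children)
    intro j h1 hj hancj hjs hjq
    have hpq : (j - 1) / 2 ≠ r.2 := hnochild j h1 hj
    rw [hL2] at hj
    rw [show pvGet l₂ j = pvGet r.1 j from pvGet_set_ne r.1 r.2 j _ (fun h => hjq h.symm),
        show pvGet l₂ ((j - 1) / 2) = pvGet r.1 ((j - 1) / 2) from
          pvGet_set_ne r.1 r.2 ((j - 1) / 2) _ (fun h => hpq h.symm)]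
    exact hHH j h1 (by omega) hancj hjs hpq
  have hJ3d : ∀ j, 1 ≤ j → j < l₂.length → (j - 1) / 2 = r.2 → newitem ≤ pvGet l₂ j :=
    fun j h1 hj hpj => absurd hpj (hnochild j h1 hj)
  have hJ4d : pvHoleChildren l₂ s r.2 :=
    fun _ j h1 hj hpj => absurd hpj (hnochild j h1 hj)
  obtain ⟨dL, dP, dH, dF⟩ := pvSiftdownAux_spec r.2 l₂ s newitem (by omega) hA hJ2d hJ3d hJ4d
  rw [hunf, hgetq]
  refine ⟨dL.trans hL2, ?_, ?_⟩
  · have h1 : l₂.set r.2 newitem = l₂ := by rw [hl2, List.set_set]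
    have h2 : l.set s newitem = l := pv_set_get_self l s hs
    rw [h1] at dP
    exact dP.trans (h2 ▸ hPerm newitem)
  · intro j h1 hj hpar
    rw [dL, hL2] at hj
    by_cases hancj : pvAnc s j
    · have hjs : j ≠ s := by
        intro h
        have := pvAnc_le hancj
        omega
      exact dH j h1 (by omega) hancj hjs
    · have hancp : ¬ pvAnc s ((j - 1) / 2) := fun h => hancj (pvAnc_child h)
      have hjq : j ≠ r.2 := fun h => hancj (h ▸ hA)
      have hpq : (j - 1) / 2 ≠ r.2 := fun h => hancp (h ▸ hA)
      have e1 : pvGet (pvSiftdownAux l₂ s r.2 newitem) j = pvGet l j := by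
        rw [dF j (by omega) hancj]
        rw [show pvGet l₂ j = pvGet r.1 j from pvGet_set_ne r.1 r.2 j _ (fun h => hjq h.symm)]
        exact hF j (by omega) hancj
      have e2 : pvGet (pvSiftdownAux l₂ s r.2 newitem) ((j - 1) / 2) = pvGet l ((j - 1) / 2) := by
        rw [dF ((j - 1) / 2) (by omega) hancp]
        rw [show pvGet l₂ ((j - 1) / 2) = pvGet r.1 ((j - 1) / 2) from
          pvGet_set_ne r.1 r.2 ((j - 1) / 2) _ (fun h => hpq h.symm)]
        exact hF ((j - 1) / 2) (by omega) hancp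
      rw [e1, e2]
      have hpars : (j - 1) / 2 ≠ s := fun h => hancp (h ▸ pvAnc_refl s)
      exact H j h1 (by omega) (by omega)

lemma pvHeapify_loop : ∀ (i : Nat) (l : List Int), 2 * i ≤ l.length → pvBelow l i →
    ((List.range i).reverse.foldl (fun h k => pvSiftup h k) l).length = l.length ∧
    ((List.range i).reverse.foldl (fun h k => pvSiftup h k) l).Perm l ∧
    pvBelow ((List.range i).reverse.foldl (fun h k => pvSiftup h k) l) 0 := by
  intro i
  induction i with
  | zero => intro l _ hb; exact ⟨rfl, List.Perm.refl l, hb⟩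
  | succ i ih =>
    intro l hl hb
    rw [List.range_succ, List.reverse_append, List.reverse_singleton, List.singleton_append,
        List.foldl_cons]
    have hs : i < l.length := by omega
    obtain ⟨sL, sP, sB⟩ := pvSiftup_spec l i hs hb
    obtain ⟨L2, P2, B2⟩ := ih (pvSiftup l i) (by omega) sB
    exact ⟨L2.trans sL, P2.trans sP, B2⟩

lemma pvHeapify_spec (l : List Int) :
    (pvHeapify l).length = l.length ∧ (pvHeapify l).Perm l ∧ pvBelow (pvHeapify l) 0 := by
  refine pvHeapify_loop (l.length / 2) l (by omega) ?_
  intro j h1 hj hpar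
  exact absurd hj (by omega)

lemma pvGet_dropLast (l : List Int) (k : Nat) (hk : k < l.length - 1) :
    pvGet l.dropLast k = pvGet l k := by
  simp [pvGet, List.getD_eq_getElem?_getD, List.getElem?_dropLast, if_pos hk]

lemma pvBelow_root_min (l : List Int) (h : pvBelow l 0) : ∀ j, j < l.length → pvGet l 0 ≤ pvGet l j := by
  intro j
  induction j using Nat.strong_induction_on with
  | _ j ih =>
    intro hj
    rcases Nat.eq_zero_or_pos j with h0 | h1
    · subst h0; exact le_refl _
    · exact le_trans (ih ((j - 1) / 2) (by omega) (by omega)) (h j h1 hj (by omega))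

lemma pvHeappop_spec (l : List Int) (h0 : l ≠ []) (hh : pvBelow l 0) :
    (pvHeappop l).1 = pvGet l 0 ∧ ((pvHeappop l).1 :: (pvHeappop l).2).Perm l ∧
    (pvHeappop l).2.length + 1 = l.length ∧ pvBelow (pvHeappop l).2 0 := by
  have hlen : 0 < l.length := List.length_pos_iff.mpr h0
  have hdl : l.dropLast.length = l.length - 1 := l.length_dropLast
  unfold pvHeappop
  by_cases hd : l.dropLast = []
  · simp only [hd, ne_eq, not_true_eq_false, if_false]
    have h1 : l.length = 1 := by
      rw [hd] at hdl
      simp at hdl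
      omega
    obtain ⟨a, ha⟩ := List.length_eq_one_iff.mp h1
    subst ha
    exact ⟨rfl, List.Perm.refl _, rfl, fun j hj1 hj2 _ => absurd hj2 (by simp)⟩
  · simp only [hd, ne_eq, not_false_eq_true, if_true]
    have hd1 : 0 < l.dropLast.length := List.length_pos_iff.mpr hd
    have hl2 : 2 ≤ l.length := by omega
    set a := l.getD (l.length - 1) 0 with hadef
    set L := l.dropLast.set 0 a with hLdef
    have hLlen : L.length = l.length - 1 := by rw [hLdef, List.length_set, hdl]
    have hBL : pvBelow L 1 := by
      intro j h1 hj hpar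
      rw [hLlen] at hj
      have e1 : pvGet L j = pvGet l j := by
        rw [show pvGet L j = pvGet l.dropLast j from pvGet_set_ne _ 0 j _ (by omega)]
        exact pvGet_dropLast l j (by omega)
      have e2 : pvGet L ((j - 1) / 2) = pvGet l ((j - 1) / 2) := by
        rw [show pvGet L ((j - 1) / 2) = pvGet l.dropLast ((j - 1) / 2) from
          pvGet_set_ne _ 0 ((j - 1) / 2) _ (by omega)]
        exact pvGet_dropLast l ((j - 1) / 2) (by omega)
      rw [e1, e2]
      exact hh j h1 (by omega) (by omega)
    obtain ⟨sL, sP, sB⟩ := pvSiftup_spec L 0 (by omega) hBL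
    have hget0 : l.dropLast.getD 0 0 = pvGet l 0 := pvGet_dropLast l 0 (by omega)
    refine ⟨hget0, ?_, ?_, sB⟩
    swap
    · rw [sL, hLlen]; omega
    -- (head of l) :: (sifted heap) is a permutation of l
    have hgl : a = l.getLast h0 := by
      rw [hadef, List.getLast_eq_getElem, List.getD_eq_getElem _ _ (by omega)]
    have hsplit : l.dropLast ++ [a] = l := by rw [hgl]; exact List.dropLast_append_getLast h0
    obtain ⟨x, t, hxt⟩ := List.exists_cons_of_ne_nil hd
    have hLxt : L = a :: t := by rw [hLdef, hxt]; rfl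
    have hx0 : pvGet l 0 = x := by
      have : pvGet l.dropLast 0 = x := by rw [hxt]; rfl
      rw [← pvGet_dropLast l 0 (by omega), this]
    have p1 : (l.dropLast.getD 0 0 :: (pvSiftup L 0)).Perm (l.dropLast.getD 0 0 :: L) :=
      List.Perm.cons _ sP
    have p2 : (l.dropLast.getD 0 0 :: L) = x :: a :: t := by rw [hget0, hx0, hLxt]
    have p3 : (x :: a :: t).Perm (x :: (t ++ [a])) :=
      List.Perm.cons x (List.perm_append_singleton a t).symm
    have p4 : x :: (t ++ [a]) = l := by rw [← hsplit, hxt]; rfl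
    exact (p2 ▸ p1).trans (p4 ▸ p3)

lemma pvGet_zero_mem (l : List Int) (h : 0 < l.length) : pvGet l 0 ∈ l := by
  rw [pvGet, List.getD_eq_getElem _ _ h]
  exact List.getElem_mem h

lemma pv_root_min_mem (l : List Int) (hb : pvBelow l 0) : ∀ y ∈ l, pvGet l 0 ≤ y := by
  intro y hy
  obtain ⟨j, hj, rfl⟩ := List.mem_iff_getElem.mp hy
  have := pvBelow_root_min l hb j hj
  rwa [show pvGet l j = l[j] from by rw [pvGet, List.getD_eq_getElem _ _ hj]] at this

-- ===== VERDICT (by name: the statement is the Claim_ definition above) =====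
theorem kth_smallest_task_spec : Claim_equal_kth_smallest_task := by
  intro task _ hpre
  unfold Pre_kth_smallest_task at hpre
  unfold Spec_kth_smallest_task
  obtain ⟨hL0, hP0, hB0⟩ := pvHeapify_spec task
  have hne0 : pvHeapify task ≠ [] := by
    intro h
    rw [h] at hL0
    simp at hL0
    omega
  obtain ⟨e1, q1, n1, b1⟩ := pvHeappop_spec (pvHeapify task) hne0 hB0
  have hne1 : (pvHeappop (pvHeapify task)).2 ≠ [] := by
    intro h
    rw [h] at n1
    simp at n1
    omega
  obtain ⟨e2, q2, n2, b2⟩ := pvHeappop_spec _ hne1 b1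
  have hne2 : (pvHeappop (pvHeappop (pvHeapify task)).2).2 ≠ [] := by
    intro h
    rw [h] at n2
    simp at n2
    omega
  obtain ⟨e3, q3, n3, b3⟩ := pvHeappop_spec _ hne2 b2
  set h0 := pvHeapify task with hh0
  set p1 := pvHeappop h0 with hp1
  set p2 := pvHeappop p1.2 with hp2
  set p3 := pvHeappop p2.2 with hp3
  set σ3 := PySem.List.sorted p3.2 (fun x => x) false with hσ3
  -- memberships and minimality facts
  have hs1 : ∀ y ∈ p1.2, y ∈ h0 := fun y hy => q1.mem_iff.mp (List.mem_cons_of_mem _ hy)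
  have hs2 : ∀ y ∈ p2.2, y ∈ p1.2 := fun y hy => q2.mem_iff.mp (List.mem_cons_of_mem _ hy)
  have hs3 : ∀ y ∈ p3.2, y ∈ p2.2 := fun y hy => q3.mem_iff.mp (List.mem_cons_of_mem _ hy)
  have hx1 : ∀ y ∈ h0, p1.1 ≤ y := e1 ▸ pv_root_min_mem h0 hB0
  have hx2 : ∀ y ∈ p1.2, p2.1 ≤ y := e2 ▸ pv_root_min_mem p1.2 b1
  have hx3 : ∀ y ∈ p2.2, p3.1 ≤ y := e3 ▸ pv_root_min_mem p2.2 b2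
  have hm2 : p2.1 ∈ p1.2 := e2 ▸ pvGet_zero_mem p1.2 (by omega)
  have hm3 : p3.1 ∈ p2.2 := e3 ▸ pvGet_zero_mem p2.2 (by omega)
  have hσp : σ3.Perm p3.2 := PySem.List.sorted_perm p3.2 (fun x => x) false
  have hσm : ∀ y ∈ σ3, y ∈ p3.2 := fun y hy => hσp.mem_iff.mp hy
  -- name the sorted order of task
  have hsorted : PySem.List.sorted task (fun x => x) false = p1.1 :: p2.1 :: p3.1 :: σ3 := by
    apply PySem.List.sorted_id_eq_of_perm_of_pairwise
    · exact (List.Perm.cons p1.1 ((List.Perm.cons p2.1 ((List.Perm.cons p3.1 hσp).trans q3)).trans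
        q2)).trans (q1.trans hP0)
    · refine List.pairwise_cons.mpr ⟨?_, List.pairwise_cons.mpr ⟨?_,
        List.pairwise_cons.mpr ⟨?_, ?_⟩⟩⟩
      · intro b hb
        rcases List.mem_cons.mp hb with h | hb
        · exact h ▸ hx1 p2.1 (hs1 _ hm2)
        rcases List.mem_cons.mp hb with h | hb
        · exact h ▸ hx1 p3.1 (hs1 _ (hs2 _ hm3))
        · exact hx1 b (hs1 _ (hs2 _ (hs3 _ (hσm b hb))))
      · intro b hb
        rcases List.mem_cons.mp hb with h | hb
        · exact h ▸ hx2 p3.1 (hs2 _ hm3)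
        · exact hx2 b (hs2 _ (hs3 _ (hσm b hb)))
      · intro b hb
        exact hx3 b (hs3 _ (hσm b hb))
      · simpa using PySem.List.sorted_pairwise p3.2 (fun x => x)
  have hA : kth_smallest_task task = [p1.1, p2.1, p3.1] := rfl
  have hB : kth_smallest_task_alt task = (PySem.List.sorted task (fun x => x) false).take 3 := by
    unfold kth_smallest_task_alt
    rw [PySem.List.slice_to _ (by norm_num)]
    rfl
  rw [hA, hB, hsorted]
  simp
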